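-- pv_equiv track=rewrite | github.com/venkateshrachapudi/llmextraction | llm_pdf_extractor.py | _extract_strings_parens
-- ===== SOURCE A (Python) =====
-- def _extract_strings_parens(s: str) -> str:
--     """Extract text from tokens like '(Hello) Tj' (handles simple escapes/nesting)."""
--     out = []
--     i, n = 0, len(s)
--     while i < n:
--         if s[i] == '(':
--             i += 1
--             buf = []
--             depth = 1
--             esc = False
--             while i < n and depth > 0:
--                 c = s[i]
--                 if esc:
--                     buf.append(c)
--                     esc = False
--                 else:
--                     if c == '\\':
--                         esc = True
--                     elif c == '(':
--                         depth += 1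
--                         buf.append(c)
--                     elif c == ')':
--                         depth -= 1
--                         if depth == 0:
--                             break
--                         buf.append(c)
--                     else:
--                         buf.append(c)
--                 i += 1
--             out.append(''.join(buf))
--         else:
--             i += 1
--     return ' '.join(out)
-- ===== SOURCE B (Python) =====
-- def _extract_strings_parens(s: str) -> str:
--     """Recursive-descent: parse each '(...)' group with a helper that recurses on nesting."""
--
--     def parse_group(s, i):
--         # scan a group body starting just after '('; return (text, next_index, closed)
--         n = len(s)
--         buf = []
--         closed = False
--         while i < n:
--             c = s[i]
--             if c == ')':
--                 i += 1
--                 closed = True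
--                 break
--             if c == '\\':
--                 if i + 1 < n:
--                     buf.append(s[i + 1])
--                 i += 2
--             elif c == '(':
--                 inner, i, inner_closed = parse_group(s, i + 1)
--                 if inner_closed:
--                     buf.append('(' + inner + ')')
--                 else:
--                     buf.append('(' + inner)
--                     break
--             else:
--                 buf.append(c)
--                 i += 1
--         return ''.join(buf), i, closed
--
--     out = []
--     i, n = 0, len(s)
--     while i < n:
--         if s[i] == '(':
--             text, i, _closed = parse_group(s, i + 1)
--             out.append(text)
--         else:
--             i += 1
--     return ' '.join(out)
-- ===== Notes on version B (the rewrite author's own statement) =====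
-- stated objective: alternative
-- what changed: Replaced the depth-counter inner loop by a recursive-descent parser: a helper parses one group body and recurses on each nested '(', so no depth variable or esc flag is maintained.
import Mathlib
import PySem

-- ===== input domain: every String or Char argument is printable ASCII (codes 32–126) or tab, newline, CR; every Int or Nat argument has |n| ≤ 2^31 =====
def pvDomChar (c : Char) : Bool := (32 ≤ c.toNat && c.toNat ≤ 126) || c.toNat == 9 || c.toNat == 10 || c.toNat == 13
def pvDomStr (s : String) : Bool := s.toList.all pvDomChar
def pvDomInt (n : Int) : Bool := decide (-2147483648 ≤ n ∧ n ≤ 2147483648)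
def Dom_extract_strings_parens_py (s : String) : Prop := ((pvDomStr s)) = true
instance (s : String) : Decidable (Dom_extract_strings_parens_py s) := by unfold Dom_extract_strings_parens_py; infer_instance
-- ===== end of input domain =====

-- B replaces A's depth-counter/esc-flag inner loop by a recursive-descent parser (one
-- recursive call per nesting level); alternative decomposition, same Python behaviour.

-- ===== PORT A =====
-- inner while loop of A: consumes chars, tracking depth (entered at 1) and esc;
-- returns (buf, remaining chars) with the closing ')' (if reached) left unconsumed,
-- exactly as A's `break` leaves i at the ')'.
def pvInnerA : List Char → Nat → Bool → List Char → (List Char × List Char)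
  | [], _, _, buf => (buf, [])
  | c :: rest, depth, esc, buf =>
    if esc then
      pvInnerA rest depth false (buf ++ [c])
    else if c = '\\' then
      pvInnerA rest depth true buf
    else if c = '(' then
      pvInnerA rest (depth + 1) false (buf ++ [c])
    else if c = ')' then
      if depth = 1 then (buf, c :: rest)
      else pvInnerA rest (depth - 1) false (buf ++ [c])
    else
      pvInnerA rest depth false (buf ++ [c])

-- outer while loop of A; fuel (= initial string length) only makes the recursion
-- structural, it is never exhausted on the call below.
def pvOuterA : Nat → List Char → List (List Char) → List (List Char)
  | 0, _, out => out
  | _ + 1, [], out => out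
  | f + 1, c :: rest, out =>
    if c = '(' then
      let p := pvInnerA rest 1 false []
      pvOuterA f p.2 (out ++ [p.1])
    else
      pvOuterA f rest out

def extract_strings_parens_py (s : String) : String :=
  PySem.Str.join " " ((pvOuterA s.toList.length s.toList []).map String.mk)

-- ===== PORT B =====
-- parse_group of Source B: scans a group body starting just after '('; returns
-- (text, rest after the closing ')', closed); recurses on each nested '('.
-- Fuel only makes the recursion structural; never exhausted on the calls below.
def pvParseB : Nat → List Char → (List Char × List Char × Bool)
  | 0, _ => ([], [], false)
  | _ + 1, [] => ([], [], false)
  | f + 1, c :: rest =>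
    if c = ')' then ([], rest, true)
    else if c = '\\' then
      match rest with
      | [] => ([], [], false)
      | d :: rest' =>
        let p := pvParseB f rest'
        (d :: p.1, p.2.1, p.2.2)
    else if c = '(' then
      let p := pvParseB f rest
      if p.2.2 then
        let q := pvParseB f p.2.1
        ('(' :: p.1 ++ ')' :: q.1, q.2.1, q.2.2)
      else
        ('(' :: p.1, [], false)
    else
      let p := pvParseB f rest
      (c :: p.1, p.2.1, p.2.2)

-- driver loop of Source B
def pvDriverB : Nat → List Char → List (List Char) → List (List Char)
  | 0, _, out => out
  | _ + 1, [], out => out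
  | f + 1, c :: rest, out =>
    if c = '(' then
      let p := pvParseB f rest
      pvDriverB f p.2.1 (out ++ [p.1])
    else
      pvDriverB f rest out

def extract_strings_parens_py_alt (s : String) : String :=
  PySem.Str.join " " ((pvDriverB s.toList.length s.toList []).map String.mk)

-- ===== PRECONDITION & SPEC =====
def Spec_extract_strings_parens_py (s : String) (out : String) : Prop := out = extract_strings_parens_py_alt s
instance (s : String) (out : String) : Decidable (Spec_extract_strings_parens_py s out) := by unfold Spec_extract_strings_parens_py; infer_instance

-- ===== CLAIM (what is proved, stated in full; the proofs are below) =====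
def Claim_equal_extract_strings_parens_py : Prop := ∀ (s : String), Dom_extract_strings_parens_py s → Spec_extract_strings_parens_py s (extract_strings_parens_py s)

-- ===== LEMMAS AND PROOFS =====

-- pvParseB consumes at least the closing ')' when it reports closed, and leaves
-- rest = [] when unclosed.
theorem pvParseB_len : ∀ (f : Nat) (l : List Char),
    ((pvParseB f l).2.2 = true → (pvParseB f l).2.1.length + 1 ≤ l.length) ∧
    ((pvParseB f l).2.2 = false → (pvParseB f l).2.1 = []) := by
  intro f
  induction f with
  | zero => intro l; simp [pvParseB]
  | succ f ih =>
    intro l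
    cases l with
    | nil => simp [pvParseB]
    | cons c rest =>
      by_cases h1 : c = ')'
      · simp [pvParseB, h1]
      · by_cases h2 : c = '\\'
        · cases rest with
          | nil => simp [pvParseB, h1, h2]
          | cons d r' =>
            obtain ⟨ha, hb⟩ := ih r'
            simp only [pvParseB, h1, h2, if_false, if_true, List.length_cons, if_neg, if_pos]
            constructor
            · intro h; have := ha h; simpa using by omega
            · exact hb
        · by_cases h3 : c = '('
          · subst h3
            obtain ⟨ha, hb⟩ := ih rest
            obtain ⟨ha2, hb2⟩ := ih (pvParseB f rest).2.1
            cases hcl : (pvParseB f rest).2.2 with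
            | false => simp [pvParseB, hcl]
            | true =>
              have h4 := ha hcl
              have h5 : pvParseB (f+1) ('(' :: rest) =
                  ('(' :: ((pvParseB f rest).1 ++ ')' :: (pvParseB f (pvParseB f rest).2.1).1),
                   (pvParseB f (pvParseB f rest).2.1).2) := by
                simp [pvParseB, hcl]
              rw [h5]; dsimp only
              constructor
              · intro h; have := ha2 h; simp only [List.length_cons]; omega
              · exact hb2
          · obtain ⟨ha, hb⟩ := ih rest
            simp only [pvParseB, h1, h2, h3, if_false, if_neg, List.length_cons]
            constructor
            · intro h; have := ha h; omega
            · exact hb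

-- main correspondence between A's depth-counter inner loop (entered at depth dep+1)
-- and B's recursive parser: dep = 0 is the outermost group, dep+1 a nested level.
theorem pvMain : ∀ (n : Nat) (l : List Char), l.length ≤ n →
    ∀ (f : Nat), l.length ≤ f → ∀ (dep : Nat) (buf : List Char),
    pvInnerA l (dep + 1) false buf =
      (match pvParseB f l with
       | (t, r, true) =>
           if dep = 0 then (buf ++ t, ')' :: r)
           else pvInnerA r dep false (buf ++ t ++ [')'])
       | (t, _, false) => (buf ++ t, [])) := by
  intro n
  induction n with
  | zero =>
    intro l hl f hf dep buf
    have : l = [] := List.length_eq_zero_iff.mp (Nat.le_zero.mp hl)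
    subst this
    cases f <;> simp [pvInnerA, pvParseB]
  | succ n ih =>
    intro l hl f hf dep buf
    cases l with
    | nil => cases f <;> simp [pvInnerA, pvParseB]
    | cons c rest =>
      obtain ⟨f', rfl⟩ : ∃ f', f = f' + 1 := by
        cases f with
        | zero => simp at hf
        | succ f' => exact ⟨f', rfl⟩
      simp only [List.length_cons] at hl hf
      by_cases h1 : c = ')'
      · subst h1
        have hstep : pvParseB (f' + 1) (')' :: rest) = ([], rest, true) := by
          simp [pvParseB]
        rw [hstep]
        cases dep with
        | zero => simp [pvInnerA]
        | succ d => simp [pvInnerA]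
      · by_cases h2 : c = '\\'
        · subst h2
          cases rest with
          | nil =>
            have hstep : pvParseB (f' + 1) ['\\'] = ([], [], false) := by
              simp [pvParseB]
            rw [hstep]
            simp [pvInnerA]
          | cons d' r' =>
            rcases hp : pvParseB f' r' with ⟨t, r, cl⟩
            have hstep : pvParseB (f' + 1) ('\\' :: d' :: r') = (d' :: t, r, cl) := by
              simp [pvParseB, hp]
            rw [hstep]
            have hih := ih r' (by simp at hl; omega) f' (by simp at hf; omega) dep (buf ++ [d'])
            rw [hp] at hih
            have hun : pvInnerA ('\\' :: d' :: r') (dep + 1) false buf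
                = pvInnerA r' (dep + 1) false (buf ++ [d']) := by
              simp [pvInnerA]
            rw [hun, hih]
            cases cl with
            | false => simp
            | true => cases dep <;> simp
        · by_cases h3 : c = '('
          · subst h3
            rcases hp : pvParseB f' rest with ⟨t1, r1, cl1⟩
            have hr1 := pvParseB_len f' rest
            rw [hp] at hr1
            have hun : pvInnerA ('(' :: rest) (dep + 1) false buf
                = pvInnerA rest (dep + 1 + 1) false (buf ++ ['(']) := by
              simp [pvInnerA]
            have hih1 := ih rest (by omega) f' (by omega) (dep + 1) (buf ++ ['('])
            rw [hp] at hih1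
            cases cl1 with
            | false =>
              have hstep : pvParseB (f' + 1) ('(' :: rest) = ('(' :: t1, [], false) := by
                simp [pvParseB, hp]
              rw [hstep, hun, hih1]
              simp
            | true =>
              have hlen1 : r1.length + 1 ≤ rest.length := hr1.1 rfl
              rcases hq : pvParseB f' r1 with ⟨t2, r2, cl2⟩
              have hstep : pvParseB (f' + 1) ('(' :: rest)
                  = ('(' :: (t1 ++ ')' :: t2), r2, cl2) := by
                simp [pvParseB, hp, hq]
              have hih2 := ih r1 (by omega) f' (by omega) dep (buf ++ ['('] ++ t1 ++ [')'])
              rw [hq] at hih2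
              rw [hstep, hun, hih1]
              simp only [Nat.succ_ne_zero, if_neg, reduceIte]
              rw [hih2]
              cases cl2 with
              | false => simp
              | true => cases dep <;> simp
          · rcases hp : pvParseB f' rest with ⟨t, r, cl⟩
            have hstep : pvParseB (f' + 1) (c :: rest) = (c :: t, r, cl) := by
              simp [pvParseB, h1, h2, h3, hp]
            have hun : pvInnerA (c :: rest) (dep + 1) false buf
                = pvInnerA rest (dep + 1) false (buf ++ [c]) := by
              simp [pvInnerA, h1, h2, h3]
            have hih := ih rest (by omega) f' (by omega) dep (buf ++ [c])
            rw [hp] at hih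
            rw [hstep, hun, hih]
            cases cl with
            | false => simp
            | true => cases dep <;> simp

theorem pvDriver_eq : ∀ (n : Nat) (l : List Char), l.length ≤ n →
    ∀ (fa fb : Nat), l.length ≤ fa → l.length ≤ fb → ∀ out,
    pvOuterA fa l out = pvDriverB fb l out := by
  intro n
  induction n with
  | zero =>
    intro l hl fa fb _ _ out
    have : l = [] := List.length_eq_zero_iff.mp (Nat.le_zero.mp hl)
    subst this
    cases fa <;> cases fb <;> simp [pvOuterA, pvDriverB]
  | succ n ih =>
    intro l hl fa fb hfa hfb out
    cases l with
    | nil => cases fa <;> cases fb <;> simp [pvOuterA, pvDriverB]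
    | cons c rest =>
      simp only [List.length_cons] at hl hfa hfb
      obtain ⟨fa', rfl⟩ : ∃ x, fa = x + 1 := ⟨fa - 1, by omega⟩
      obtain ⟨fb', rfl⟩ : ∃ x, fb = x + 1 := ⟨fb - 1, by omega⟩
      by_cases h : c = '('
      · subst h
        rcases hp : pvParseB fb' rest with ⟨t, r, cl⟩
        have hm := pvMain rest.length rest le_rfl fb' (by omega) 0 []
        rw [hp] at hm
        have hlen := pvParseB_len fb' rest
        rw [hp] at hlen
        have hd : pvDriverB (fb' + 1) ('(' :: rest) out = pvDriverB fb' r (out ++ [t]) := by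
          simp [pvDriverB, hp]
        cases cl with
        | true =>
          have hinner : pvInnerA rest 1 false [] = (t, ')' :: r) := by simpa using hm
          have hlen1 : r.length + 1 ≤ rest.length := hlen.1 rfl
          obtain ⟨fa'', rfl⟩ : ∃ x, fa' = x + 1 := ⟨fa' - 1, by omega⟩
          have ho : pvOuterA (fa'' + 1 + 1) ('(' :: rest) out
              = pvOuterA (fa'' + 1) (')' :: r) (out ++ [t]) := by
            simp [pvOuterA, hinner]
          have ho2 : pvOuterA (fa'' + 1) (')' :: r) (out ++ [t])
              = pvOuterA fa'' r (out ++ [t]) := by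
            simp [pvOuterA]
          rw [ho, ho2, hd]
          exact ih r (by omega) fa'' fb' (by omega) (by omega) _
        | false =>
          have hr : r = [] := hlen.2 rfl
          subst hr
          have hinner : pvInnerA rest 1 false [] = (t, []) := by simpa using hm
          have ho : pvOuterA (fa' + 1) ('(' :: rest) out = pvOuterA fa' [] (out ++ [t]) := by
            simp [pvOuterA, hinner]
          rw [ho, hd]
          cases fa' <;> cases fb' <;> simp [pvOuterA, pvDriverB]
      · have ho : pvOuterA (fa' + 1) (c :: rest) out = pvOuterA fa' rest out := by
          simp [pvOuterA, h]
        have hd : pvDriverB (fb' + 1) (c :: rest) out = pvDriverB fb' rest out := by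
          simp [pvDriverB, h]
        rw [ho, hd]
        exact ih rest (by omega) fa' fb' (by omega) (by omega) _

-- ===== VERDICT (by name: the statement is the Claim_ definition above) =====
theorem extract_strings_parens_py_spec : Claim_equal_extract_strings_parens_py := by
  intro s _
  unfold Spec_extract_strings_parens_py extract_strings_parens_py extract_strings_parens_py_alt
  rw [pvDriver_eq s.toList.length s.toList le_rfl _ _ le_rfl le_rfl]
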